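-- pv_equiv track=rewrite | github.com/nikytz/es2 | es2.py | venditaMax
-- ===== SOURCE A (Python) =====
-- def venditaMax(tupla_vendite):
--     max=0
--     prodottoMax=[]
--     for(reparto,materia),(prodotto,(metodo,soldi))in tupla_vendite:
--       if soldi>max:
--         max=soldi
--     for(reparto,materia),(prodotto,(metodo,soldi))in tupla_vendite:
--       if soldi==max:
--         prodottoMax.append((prodotto,soldi))
--     return (max, prodottoMax)
-- ===== SOURCE B (Python) =====
-- def venditaMax(tupla_vendite):
--     m = 0
--     rev = []  # matching (prodotto, soldi) pairs, collected right-to-left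
--     for (reparto, materia), (prodotto, (metodo, soldi)) in reversed(tupla_vendite):
--         if soldi > m:
--             m = soldi
--             rev = [(prodotto, soldi)]
--         elif soldi == m:
--             rev.append((prodotto, soldi))
--     return (m, rev[::-1])
-- ===== Notes on version B (the rewrite author's own statement) =====
-- stated objective: alternative
-- what changed: one backward scan that maintains the running max and builds the matching-products list back-to-front (reversed at the end), instead of A's two forward passes (find the max, then re-scan to collect)
import Mathlib
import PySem

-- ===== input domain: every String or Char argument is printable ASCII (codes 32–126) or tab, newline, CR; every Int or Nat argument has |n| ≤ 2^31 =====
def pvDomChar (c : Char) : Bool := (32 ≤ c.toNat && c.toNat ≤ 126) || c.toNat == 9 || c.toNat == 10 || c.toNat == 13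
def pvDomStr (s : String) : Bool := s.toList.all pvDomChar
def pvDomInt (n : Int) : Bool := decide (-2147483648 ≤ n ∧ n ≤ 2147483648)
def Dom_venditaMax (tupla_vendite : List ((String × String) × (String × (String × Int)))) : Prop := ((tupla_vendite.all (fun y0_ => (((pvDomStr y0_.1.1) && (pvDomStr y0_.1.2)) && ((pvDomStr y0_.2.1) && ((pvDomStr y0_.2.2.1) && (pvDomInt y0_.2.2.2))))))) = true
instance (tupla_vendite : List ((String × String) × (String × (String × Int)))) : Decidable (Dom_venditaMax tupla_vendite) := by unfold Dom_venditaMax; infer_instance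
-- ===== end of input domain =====

-- B replaces A's two forward passes (find the max, then re-scan to collect) by ONE backward
-- scan that keeps the running max and builds the matching list back-to-front, reversed at the end.


-- ===== PORT A =====
-- first loop: max = 0; if soldi > max: max = soldi
-- second loop: if soldi == max: prodottoMax.append((prodotto, soldi))
def venditaMax (tupla_vendite : List ((String × String) × (String × (String × Int)))) : Int × (List (String × Int)) :=
  let max := tupla_vendite.foldl (fun m x => if x.2.2.2 > m then x.2.2.2 else m) (0 : Int)
  let prodottoMax := tupla_vendite.foldl
    (fun acc x => if x.2.2.2 = max then acc ++ [(x.2.1, x.2.2.2)] else acc)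
    ([] : List (String × Int))
  (max, prodottoMax)

-- ===== PORT B =====
-- loop body of Source B's backward scan: soldi > m resets, soldi == m appends, else unchanged
def venditaMaxStep (st : Int × List (String × Int))
    (x : (String × String) × (String × (String × Int))) : Int × List (String × Int) :=
  match x with
  | (_, (prodotto, (_, soldi))) =>
    if soldi > st.1 then (soldi, [(prodotto, soldi)])
    else if soldi = st.1 then (st.1, st.2 ++ [(prodotto, soldi)])
    else st

-- Source B: scan reversed(tupla_vendite) with venditaMaxStep, then return (m, rev[::-1])
def venditaMax_alt (tupla_vendite : List ((String × String) × (String × (String × Int)))) : Int × (List (String × Int)) :=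
  let st := tupla_vendite.reverse.foldl venditaMaxStep ((0 : Int), ([] : List (String × Int)))
  (st.1, st.2.reverse)

-- ===== PRECONDITION & SPEC =====
def Spec_venditaMax (tupla_vendite : List ((String × String) × (String × (String × Int)))) (out : Int × (List (String × Int))) : Prop := out = venditaMax_alt tupla_vendite
instance (tupla_vendite : List ((String × String) × (String × (String × Int)))) (out : Int × (List (String × Int))) : Decidable (Spec_venditaMax tupla_vendite out) := by unfold Spec_venditaMax; infer_instance

-- ===== CLAIM (what is proved, stated in full; the proofs are below) =====
def Claim_equal_venditaMax : Prop := ∀ (tupla_vendite : List ((String × String) × (String × (String × Int)))), Dom_venditaMax tupla_vendite → Spec_venditaMax tupla_vendite (venditaMax tupla_vendite)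

-- ===== LEMMAS AND PROOFS =====

-- the maximum soldi of l (with baseline 0), as a right recursion
def pvMaxR : List ((String × String) × (String × (String × Int))) → Int
  | [] => 0
  | x :: t => if x.2.2.2 > pvMaxR t then x.2.2.2 else pvMaxR t

-- the elements of l whose soldi equals m, as (prodotto, soldi) pairs, in order
def pvCollect (m : Int) : List ((String × String) × (String × (String × Int))) → List (String × Int)
  | [] => []
  | x :: t => if x.2.2.2 = m then (x.2.1, x.2.2.2) :: pvCollect m t else pvCollect m t

lemma pvMaxR_nonneg (l : List ((String × String) × (String × (String × Int)))) :
    0 ≤ pvMaxR l := by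
  induction l with
  | nil => simp [pvMaxR]
  | cons x t ih => simp only [pvMaxR]; split <;> omega

lemma pvMaxR_ge (l : List ((String × String) × (String × (String × Int)))) :
    ∀ x ∈ l, x.2.2.2 ≤ pvMaxR l := by
  induction l with
  | nil => simp
  | cons y t ih =>
    intro x hx
    rcases List.mem_cons.mp hx with h | h
    · subst h; simp only [pvMaxR]; split <;> omega
    · have := ih x h; simp only [pvMaxR]; split <;> omega

lemma pvCollect_nil_of_gt (m : Int) (l : List ((String × String) × (String × (String × Int))))
    (h : pvMaxR l < m) : pvCollect m l = [] := by
  induction l with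
  | nil => simp [pvCollect]
  | cons x t ih =>
    have hx : x.2.2.2 ≤ pvMaxR (x :: t) := pvMaxR_ge _ x (List.mem_cons_self ..)
    have ht : pvMaxR t ≤ pvMaxR (x :: t) := by simp only [pvMaxR]; split <;> omega
    have hne : x.2.2.2 ≠ m := by omega
    simp only [pvCollect, if_neg hne]
    exact ih (by omega)

-- A's first loop computes pvMaxR
lemma loopA1 (l : List ((String × String) × (String × (String × Int)))) :
    ∀ m : Int, 0 ≤ m →
      l.foldl (fun m x => if x.2.2.2 > m then x.2.2.2 else m) m
        = if pvMaxR l > m then pvMaxR l else m := by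
  induction l with
  | nil => intro m hm; simp only [List.foldl_nil, pvMaxR]; split <;> omega
  | cons x t ih =>
    intro m hm
    simp only [List.foldl_cons, pvMaxR]
    by_cases h : x.2.2.2 > m
    · rw [if_pos h, ih _ (by omega)]; split_ifs <;> omega
    · rw [if_neg h, ih _ hm]; split_ifs <;> omega

-- A's second loop appends pvCollect
lemma loopA2 (m : Int) (l : List ((String × String) × (String × (String × Int)))) :
    ∀ acc : List (String × Int),
      l.foldl (fun acc x => if x.2.2.2 = m then acc ++ [(x.2.1, x.2.2.2)] else acc) acc
        = acc ++ pvCollect m l := by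
  induction l with
  | nil => intro acc; simp [pvCollect]
  | cons x t ih =>
    intro acc
    simp only [List.foldl_cons, pvCollect]
    by_cases h : x.2.2.2 = m <;> simp [h, ih]

-- B's backward scan yields pvMaxR and the reverse of pvCollect
lemma loopB (l : List ((String × String) × (String × (String × Int)))) :
    l.reverse.foldl venditaMaxStep ((0 : Int), ([] : List (String × Int)))
      = (pvMaxR l, (pvCollect (pvMaxR l) l).reverse) := by
  rw [List.foldl_reverse]
  induction l with
  | nil => simp [pvMaxR, pvCollect]
  | cons x t ih =>
    obtain ⟨⟨rep, mat⟩, prod, met, soldi⟩ := x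
    simp only [List.foldr_cons]
    rw [ih]
    simp only [venditaMaxStep, pvMaxR, pvCollect]
    by_cases hlt : pvMaxR t < soldi
    · have : pvCollect soldi t = [] := pvCollect_nil_of_gt _ _ hlt
      simp [hlt, this]
    · by_cases heq : soldi = pvMaxR t
      · simp [hlt, heq]
      · simp [hlt, heq]

-- ===== VERDICT (by name: the statement is the Claim_ definition above) =====
theorem venditaMax_spec : Claim_equal_venditaMax := by
  intro l _
  unfold Spec_venditaMax venditaMax venditaMax_alt
  rw [loopB, loopA1 l 0 le_rfl]
  have h0 : (if pvMaxR l > 0 then pvMaxR l else 0) = pvMaxR l := by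
    have := pvMaxR_nonneg l; split <;> omega
  simp only [h0, loopA2, List.nil_append, List.reverse_reverse]
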